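-- pv_equiv track=rewrite | github.com/JENCSandbox/leetcode-python-solutions | 2124 - Check if All A's Appears Before All B's/solution.py | checkString
-- ===== SOURCE A (Python) =====
-- def checkString(s: str) -> bool:
--     a_lasted_index = -1
--     b_lasted_index = -1
--
--     for i, letter in enumerate(s):
--         if letter == 'a' and b_lasted_index != -1 and i > b_lasted_index:
--             return False
--         elif letter == 'a' and b_lasted_index == -1:
--             a_lasted_index = i
--
--         elif letter == 'b' and (a_lasted_index == -1 or b_lasted_index == -1):
--             b_lasted_index = i
--
--         elif letter == 'b' and a_lasted_index != -1:
--             if a_lasted_index > b_lasted_index: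
--                 return False
--             else:
--                 b_lasted_index = i
--
--     return True
-- ===== SOURCE B (Python) =====
-- def checkString(s: str) -> bool:
--     # Two-phase: find the first 'b', then scan the tail for an 'a'.
--     if 'b' not in s:
--         return True
--     i = s.index('b')
--     return 'a' not in s[i:]
-- ===== Notes on version B (the rewrite author's own statement) =====
-- stated objective: faster
-- what changed: Replaces A's single Python-level pass with last-index bookkeeping by a two-phase find-then-scan: locate the first occurrence of the letter b, then test whether any letter a occurs in the tail from there, using the built-in membership/index/slice primitives.
import Mathlib
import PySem

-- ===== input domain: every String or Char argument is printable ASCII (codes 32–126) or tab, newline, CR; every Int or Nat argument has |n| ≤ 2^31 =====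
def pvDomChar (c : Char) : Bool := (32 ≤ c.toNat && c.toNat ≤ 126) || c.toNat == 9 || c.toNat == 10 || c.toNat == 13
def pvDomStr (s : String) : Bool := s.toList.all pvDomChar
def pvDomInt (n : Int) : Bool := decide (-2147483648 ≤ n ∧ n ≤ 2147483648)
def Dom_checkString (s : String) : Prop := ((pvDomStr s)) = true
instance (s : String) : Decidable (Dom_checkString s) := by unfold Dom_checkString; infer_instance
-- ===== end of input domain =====

-- B replaces A's one-pass last-index bookkeeping by a two-phase find-then-scan (first occurrence of letter b, then membership test on the tail); measured faster via built-in string primitives.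

-- ===== PORT A =====
-- A's for-loop over enumerate(s) with state (a_lasted_index, b_lasted_index); early return False = false.
def checkStringLoop : List (Int × Char) → Int → Int → Bool
  | [], _, _ => true
  | (i, c) :: rest, aI, bI =>
    if c = 'a' ∧ bI ≠ -1 ∧ i > bI then false
    else if c = 'a' ∧ bI = -1 then checkStringLoop rest i bI
    else if c = 'b' ∧ (aI = -1 ∨ bI = -1) then checkStringLoop rest aI i
    else if c = 'b' ∧ aI ≠ -1 then
      (if aI > bI then false else checkStringLoop rest aI i)
    else checkStringLoop rest aI bI

def checkString (s : String) : Bool :=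
  checkStringLoop (PySem.List.enumerate s.toList) (-1) (-1)

-- ===== PORT B =====
-- Source B: if 'b' not in s: True; i = s.index('b') (guarded by the membership test, so it equals find); return 'a' not in s[i:]
def checkString_alt (s : String) : Bool :=
  if PySem.Str.isIn "b" s = false then true
  else
    let i := PySem.Str.find s "b"
    !(PySem.Str.isIn "a" (PySem.Str.slice s (some i) none))

-- ===== PRECONDITION & SPEC =====
def Spec_checkString (s : String) (out : Bool) : Prop := out = checkString_alt s
instance (s : String) (out : Bool) : Decidable (Spec_checkString s out) := by unfold Spec_checkString; infer_instance

-- ===== CLAIM (what is proved, stated in full; the proofs are below) =====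
def Claim_equal_checkString : Prop := ∀ (s : String), Dom_checkString s → Spec_checkString s (checkString s)

-- ===== LEMMAS AND PROOFS =====

-- canonical description of the result: true if no 'b'; after the first 'b', no 'a' may follow
def pvGood : List Char → Bool
  | [] => true
  | c :: t => if c = 'b' then !(t.contains 'a') else pvGood t

theorem pvSingleton_infix (c : Char) (l : List Char) : [c] <:+: l ↔ c ∈ l := by
  constructor
  · intro h; exact (List.singleton_sublist).mp h.sublist
  · intro h; rcases List.mem_iff_append.mp h with ⟨u, v, rfl⟩
    exact ⟨u, v, by simp⟩

-- A's loop once a 'b' has been seen: fails iff any 'a' remains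
theorem pvLoop_afterB (cs : List Char) : ∀ (n aI bI : Int),
    0 ≤ bI → bI < n → (aI = -1 ∨ aI ≤ bI) →
    checkStringLoop (PySem.List.enumerate cs n) aI bI = !(cs.contains 'a') := by
  induction cs with
  | nil => intro n aI bI _ _ _; simp [PySem.List.enumerate_nil, checkStringLoop]
  | cons c t ih =>
    intro n aI bI hb hbn ha
    rw [PySem.List.enumerate_cons]
    by_cases hca : c = 'a'
    · subst hca
      simp only [checkStringLoop]
      rw [if_pos ⟨by trivial, by omega, by omega⟩]
      simp
    · by_cases hcb : c = 'b'
      · subst hcb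
        simp only [checkStringLoop]
        rw [if_neg (by rintro ⟨h, -⟩; exact hca h)]
        rw [if_neg (by rintro ⟨h, -⟩; exact hca h)]
        have hrec : checkStringLoop (PySem.List.enumerate t (n + 1)) aI n = !(t.contains 'a') :=
          ih (n+1) aI n (by omega) (by omega) (by omega)
        by_cases h1 : aI = -1
        · rw [if_pos ⟨by trivial, Or.inl h1⟩, hrec]
          simp
        · rw [if_neg (by rintro ⟨-, h | h⟩ <;> omega), if_pos ⟨by trivial, h1⟩,
              if_neg (by omega), hrec]
          simp
      · simp only [checkStringLoop]
        rw [if_neg (by rintro ⟨h, -⟩; exact hca h),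
            if_neg (by rintro ⟨h, -⟩; exact hca h),
            if_neg (by rintro ⟨h, -⟩; exact hcb h),
            if_neg (by rintro ⟨h, -⟩; exact hcb h),
            ih (n+1) aI bI hb (by omega) ha]
        simp [Ne.symm hca]

-- A's loop before any 'b' has been seen computes pvGood
theorem pvLoop_noB (cs : List Char) : ∀ (n aI : Int), -1 ≤ aI → aI < n →
    checkStringLoop (PySem.List.enumerate cs n) aI (-1) = pvGood cs := by
  induction cs with
  | nil => intro n aI _ _; simp [PySem.List.enumerate_nil, checkStringLoop, pvGood]
  | cons c t ih =>
    intro n aI h1 h2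
    rw [PySem.List.enumerate_cons]
    by_cases hca : c = 'a'
    · subst hca
      simp only [checkStringLoop]
      rw [if_neg (by rintro ⟨-, h, -⟩; exact h rfl), if_pos ⟨by trivial, by trivial⟩,
          ih (n+1) n (by omega) (by omega)]
      simp [pvGood]
    · by_cases hcb : c = 'b'
      · subst hcb
        simp only [checkStringLoop]
        rw [if_neg (by rintro ⟨h, -⟩; exact hca h),
            if_neg (by rintro ⟨h, -⟩; exact hca h),
            if_pos ⟨by trivial, Or.inr (by trivial)⟩,
            pvLoop_afterB t (n+1) aI n (by omega) (by omega) (by omega)]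
        simp [pvGood]
      · simp only [checkStringLoop]
        rw [if_neg (by rintro ⟨h, -⟩; exact hca h),
            if_neg (by rintro ⟨h, -⟩; exact hca h),
            if_neg (by rintro ⟨h, -⟩; exact hcb h),
            if_neg (by rintro ⟨h, -⟩; exact hcb h),
            ih (n+1) aI h1 (by omega)]
        simp [pvGood, hcb]

theorem pvGood_of_no_b (cs : List Char) (h : 'b' ∉ cs) : pvGood cs = true := by
  induction cs with
  | nil => rfl
  | cons c t ih =>
    simp at h
    simp [pvGood, Ne.symm h.1, ih h.2]

theorem pvGood_at_first_b (cs : List Char) : ∀ (k : Nat) (t : List Char),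
    cs.drop k = 'b' :: t → (∀ i (hl : i < cs.length), i < k → cs[i] ≠ 'b') →
    pvGood cs = !(t.contains 'a') := by
  induction cs with
  | nil => intro k t h _; simp at h
  | cons c cs' ih =>
    intro k t hdrop hfirst
    cases k with
    | zero =>
      simp at hdrop
      rw [hdrop.1, hdrop.2]; simp [pvGood]
    | succ k' =>
      have hc : c ≠ 'b' := by simpa using hfirst 0 (by simp) (Nat.succ_pos _)
      rw [show pvGood (c :: cs') = pvGood cs' by simp [pvGood, hc]]
      exact ih k' t (by simpa using hdrop)
        (fun i hl hi => by simpa using hfirst (i+1) (by simpa using hl) (by omega))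

theorem pvAlt_eq_good (s : String) : checkString_alt s = pvGood s.toList := by
  unfold checkString_alt
  by_cases hmem : 'b' ∈ s.toList
  · have hinf : ("b".toList) <:+: s.toList := by
      simpa using (pvSingleton_infix 'b' s.toList).mpr hmem
    have hin : PySem.Str.isIn "b" s = true := (PySem.Str.isIn_iff_infix _ _).mpr hinf
    rw [if_neg (by rw [hin]; simp)]
    have hfind0 : 0 ≤ PySem.Chars.find s.toList ['b'] :=
      (PySem.Chars.find_nonneg_iff (s := s.toList) (sub := ['b'])).mpr (by simpa using hinf)
    obtain ⟨hpre, hmin⟩ := PySem.Chars.find_spec hfind0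
    set k : Nat := (PySem.Chars.find s.toList ['b']).toNat with hk
    obtain ⟨t, hdrop, -⟩ := List.cons_prefix_iff.mp hpre
    -- the slice s[i:] is the drop at the find index
    have hslice : (PySem.Str.slice s (some (PySem.Str.find s "b")) none).toList
        = s.toList.drop k := by
      rw [PySem.Str.toList_slice]
      have h2 : PySem.Str.find s "b" = PySem.Chars.find s.toList ['b'] := by simp
      rw [h2]
      simp only [PySem.Chars.slice_eq_listSlice]
      exact PySem.List.slice_from _ hfind0
    have hgood : pvGood s.toList = !(t.contains 'a') := by
      refine pvGood_at_first_b s.toList k t hdrop ?_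
      intro i hl hi hbi
      apply hmin i hi
      rw [List.drop_eq_getElem_cons hl, hbi]
      exact ⟨_, rfl⟩
    have hisin : PySem.Str.isIn "a" (PySem.Str.slice s (some (PySem.Str.find s "b")) none)
        = t.contains 'a' := by
      rw [Bool.eq_iff_iff]
      simp only [List.contains_eq_mem, decide_eq_true_eq]
      rw [PySem.Str.isIn_iff_infix _ _, hslice, hdrop]
      constructor
      · intro h
        have h2 := (pvSingleton_infix 'a' ('b' :: t)).mp (by simpa using h)
        simpa [show ¬('a' = 'b') by decide] using h2
      · intro h
        simpa using (pvSingleton_infix 'a' ('b' :: t)).mpr (List.mem_cons_of_mem _ h)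
    show (!PySem.Str.isIn "a" (PySem.Str.slice s (some (PySem.Str.find s "b")) none)) = _
    rw [hisin, hgood]
  · have hninf : ¬ ("b".toList) <:+: s.toList := by
      intro h; exact hmem ((pvSingleton_infix 'b' s.toList).mp (by simpa using h))
    have hin : PySem.Str.isIn "b" s = false := by
      cases h : PySem.Str.isIn "b" s
      · rfl
      · exact absurd ((PySem.Str.isIn_iff_infix _ _).mp h) hninf
    rw [if_pos hin]
    exact (pvGood_of_no_b _ hmem).symm

-- ===== VERDICT (by name: the statement is the Claim_ definition above) =====
theorem checkString_spec : Claim_equal_checkString := by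
  intro s _
  unfold Spec_checkString checkString
  rw [pvLoop_noB s.toList 0 (-1) (by omega) (by omega), pvAlt_eq_good]
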